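-- pv_equiv track=rewrite | github.com/lab7arriam/Cry_phylogeny | scripts/get_breakpoints_from_RDP.py | check_sublist_of_list
-- ===== SOURCE A (Python) =====
-- def check_sublist_of_list(sub_list, full_list):
--
--     sub_list=sorted(sub_list)
--     full_list=sorted(full_list)
--     els=[]
--
--     for el in sub_list:
--         if el in full_list:
--             els.append(el)
--
--     return(els==sub_list)
-- ===== SOURCE B (Python) =====
-- def check_sublist_of_list(sub_list, full_list):
--     sub_list = sorted(sub_list)
--     full_list = sorted(full_list)
--     j = 0
--     n = len(full_list)
--     for el in sub_list:
--         while j < n and full_list[j] < el: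
--             j += 1
--         if j >= n or full_list[j] != el:
--             return False
--     return True
-- ===== Notes on version B (the rewrite author's own statement) =====
-- stated objective: faster
-- what changed: Replaces the per-element 'el in full_list' rescan over the sorted full list by a single two-pointer merge walk over both sorted lists (not advancing past a matched element, so duplicates in sub_list still match).
import Mathlib
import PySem

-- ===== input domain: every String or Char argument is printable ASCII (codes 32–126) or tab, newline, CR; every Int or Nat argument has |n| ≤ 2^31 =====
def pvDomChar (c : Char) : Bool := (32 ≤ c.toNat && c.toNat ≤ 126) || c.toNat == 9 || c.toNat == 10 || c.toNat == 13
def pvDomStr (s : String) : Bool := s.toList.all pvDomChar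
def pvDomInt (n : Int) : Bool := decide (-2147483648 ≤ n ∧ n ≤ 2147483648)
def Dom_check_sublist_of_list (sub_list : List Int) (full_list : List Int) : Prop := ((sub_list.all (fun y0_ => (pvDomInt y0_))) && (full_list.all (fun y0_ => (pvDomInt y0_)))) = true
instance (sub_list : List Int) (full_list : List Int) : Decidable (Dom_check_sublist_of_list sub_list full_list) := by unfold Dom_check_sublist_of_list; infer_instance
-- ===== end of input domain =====

-- B replaces A's per-element membership rescan of the sorted full list by a single
-- two-pointer merge walk over the two sorted lists (objective: faster).


-- ===== PORT A =====
def check_sublist_of_list (sub_list : List Int) (full_list : List Int) : Bool :=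
  let s := PySem.List.sorted sub_list (fun x => x) false
  let f := PySem.List.sorted full_list (fun x => x) false
  let els := s.foldl (fun acc el => if el ∈ f then acc ++ [el] else acc) []
  decide (els = s)

-- ===== PORT B =====
-- the for-loop over sorted sub with the inner 'while full[j] < el: j += 1': the
-- remaining suffix full.dropWhile (· < el) plays the role of full_list[j:]
def pvMergeCheck : List Int → List Int → Bool
  | [], _ => true
  | e :: rest, full =>
    match full.dropWhile (fun x => decide (x < e)) with
    | [] => false
    | h :: t => if h ≠ e then false else pvMergeCheck rest (h :: t)

def check_sublist_of_list_alt (sub_list : List Int) (full_list : List Int) : Bool :=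
  pvMergeCheck (PySem.List.sorted sub_list (fun x => x) false)
               (PySem.List.sorted full_list (fun x => x) false)

-- ===== PRECONDITION & SPEC =====
def Spec_check_sublist_of_list (sub_list : List Int) (full_list : List Int) (out : Bool) : Prop := out = check_sublist_of_list_alt sub_list full_list
instance (sub_list : List Int) (full_list : List Int) (out : Bool) : Decidable (Spec_check_sublist_of_list sub_list full_list out) := by unfold Spec_check_sublist_of_list; infer_instance

-- ===== CLAIM (what is proved, stated in full; the proofs are below) =====
def Claim_equal_check_sublist_of_list : Prop := ∀ (sub_list : List Int) (full_list : List Int), Dom_check_sublist_of_list sub_list full_list → Spec_check_sublist_of_list sub_list full_list (check_sublist_of_list sub_list full_list)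

-- ===== LEMMAS AND PROOFS =====

-- `all` only depends on the predicate's values on members
theorem pv_all_congr_mem {l : List Int} {p q : Int → Bool} (h : ∀ x ∈ l, p x = q x) :
    l.all p = l.all q := by
  induction l with
  | nil => rfl
  | cons a l ih =>
    simp only [List.all_cons, h a (by simp), ih (fun x hx => h x (by simp [hx]))]

-- dropped elements are < e, so membership of any x ≥ e is unchanged
theorem pv_mem_dropWhile_of_ge {f : List Int} {e x : Int} (hxe : e ≤ x) :
    x ∈ f ↔ x ∈ f.dropWhile (fun y => decide (y < e)) := by
  constructor
  · intro hx
    rcases List.mem_append.mp ((List.takeWhile_append_dropWhile (l := f)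
        (p := fun y => decide (y < e))) ▸ hx) with h | h
    · have := List.mem_takeWhile_imp h
      simp at this; omega
    · exact h
  · intro hx
    exact (List.dropWhile_sublist _).mem hx

-- A's result equals plain containment of sub_list in full_list
theorem pv_A_eq (sub full : List Int) :
    check_sublist_of_list sub full = sub.all (fun e => decide (e ∈ full)) := by
  show decide _ = _
  rw [PySem.List.foldl_append_ite_eq_filter, List.nil_append]
  rcases Bool.eq_false_or_eq_true (sub.all (fun e => decide (e ∈ full))) with h | h
  · rw [h, decide_eq_true_eq]
    apply List.filter_eq_self.mpr
    intro x hx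
    have hx' : x ∈ sub := (PySem.List.mem_sorted _ _ _ _).mp hx
    have := (List.all_eq_true.mp h) x hx'
    simp only [decide_eq_true_eq] at this ⊢
    exact (PySem.List.mem_sorted _ _ _ _).mpr this
  · rw [h, decide_eq_false_iff_not]
    intro hfil
    have hall : sub.all (fun e => decide (e ∈ full)) = true := by
      simp only [List.all_eq_true, decide_eq_true_eq]
      intro x hx
      have hx' : x ∈ PySem.List.sorted sub (fun x => x) false :=
        (PySem.List.mem_sorted _ _ _ _).mpr hx
      have := List.filter_eq_self.mp hfil x hx'
      simp only [decide_eq_true_eq] at this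
      exact (PySem.List.mem_sorted _ _ _ _).mp this
    rw [h] at hall; exact Bool.false_ne_true hall

-- B's merge walk equals plain containment, on sorted inputs
theorem pv_merge_eq (s f : List Int) (hs : s.Pairwise (· ≤ ·)) (hf : f.Pairwise (· ≤ ·)) :
    pvMergeCheck s f = s.all (fun e => decide (e ∈ f)) := by
  induction s generalizing f with
  | nil => rfl
  | cons e rest ih =>
    have hrest : rest.Pairwise (· ≤ ·) := hs.tail
    have he : ∀ x ∈ rest, e ≤ x := fun x hx => List.rel_of_pairwise_cons hs hx
    have hf' : (f.dropWhile (fun y => decide (y < e))).Pairwise (· ≤ ·) :=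
      hf.sublist (List.dropWhile_sublist _)
    rw [pvMergeCheck]
    cases hdrop : f.dropWhile (fun y => decide (y < e)) with
    | nil =>
      have hne : e ∉ f := by
        rw [pv_mem_dropWhile_of_ge (le_refl e), hdrop]; simp
      simp [hne]
    | cons h t =>
      have hmemf : e ∈ f ↔ e ∈ h :: t := by
        rw [pv_mem_dropWhile_of_ge (le_refl e), hdrop]
      have heh : e ≤ h := by
        have hh := List.head?_dropWhile_not (fun y => decide (y < e)) f
        rw [hdrop] at hh
        simp only [List.head?_cons] at hh
        simp only [decide_eq_false_iff_not, not_lt] at hh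
        exact hh
      rw [hdrop] at hf'
      by_cases heq : h = e
      · subst heq
        have hmem : h ∈ f := hmemf.mpr (by simp)
        simp only [ne_eq, not_true_eq_false, if_false]
        rw [ih (h :: t) hrest hf']
        simp only [List.all_cons, hmem, decide_true, Bool.true_and]
        apply pv_all_congr_mem
        intro x hx
        have hiff := pv_mem_dropWhile_of_ge (f := f) (e := h) (x := x) (he x hx)
        rw [hdrop] at hiff
        simp only [decide_eq_decide]
        exact hiff.symm
      · have hne : e ∉ f := by
          intro hmem
          rcases hmemf.mp hmem with _ | hmemt
          · exact heq rfl
          · have hle : h ≤ e := List.rel_of_pairwise_cons hf' (by assumption)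
            exact heq (le_antisymm hle heh)
        simp [heq, hne]

-- ===== VERDICT (by name: the statement is the Claim_ definition above) =====
theorem check_sublist_of_list_spec : Claim_equal_check_sublist_of_list := by
  intro sub full _
  show check_sublist_of_list sub full = check_sublist_of_list_alt sub full
  rw [pv_A_eq]
  unfold check_sublist_of_list_alt
  rw [pv_merge_eq _ _ (by simpa using PySem.List.sorted_pairwise sub (fun x => x))
        (by simpa using PySem.List.sorted_pairwise full (fun x => x))]
  rcases Bool.eq_false_or_eq_true (sub.all (fun e => decide (e ∈ full))) with h | h <;> rw [h]
  · symm
    simp only [List.all_eq_true, decide_eq_true_eq] at h ⊢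
    intro x hx
    exact (PySem.List.mem_sorted _ _ _ _).mpr (h x ((PySem.List.mem_sorted _ _ _ _).mp hx))
  · symm
    simp only [List.all_eq_false] at h ⊢
    rcases h with ⟨x, hx, hpx⟩
    refine ⟨x, (PySem.List.mem_sorted _ _ _ _).mpr hx, ?_⟩
    simp only [decide_eq_true_eq] at hpx ⊢
    intro hmem
    exact hpx ((PySem.List.mem_sorted _ _ _ _).mp hmem)
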